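-- pv_equiv track=rewrite | github.com/pypi-data/pypi-mirror-395 | packages/uniqseq/uniqseq-0.2.0.tar.gz/uniqseq-0.2.0/optimization/benchmark_uniqseq.py | generate_mixed_pattern
-- ===== SOURCE A (Python) =====
-- def generate_mixed_pattern(num_lines: int):
--     """Generate mixed patterns with varying repetition."""
--     lines = []
--     i = 0
--     while len(lines) < num_lines:
--         # Add some unique lines
--         for _ in range(20):
--             lines.append(f"Unique {i}")
--             i += 1
--             if len(lines) >= num_lines:
--                 break
--
--         # Add a small repeating pattern (5x)
--         pattern = [f"Small pattern {i}:{j}" for j in range(10)]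
--         for _ in range(5):
--             lines.extend(pattern)
--             if len(lines) >= num_lines:
--                 break
--
--         # Add a large repeating pattern (3x)
--         pattern = [f"Large pattern {i}:{j}" for j in range(50)]
--         for _ in range(3):
--             lines.extend(pattern)
--             if len(lines) >= num_lines:
--                 break
--
--         i += 1
--
--     return lines[:num_lines]
-- ===== SOURCE B (Python) =====
-- def generate_mixed_pattern(num_lines: int):
--     """Generate mixed patterns with varying repetition."""
--     # Closed-form random access: line m of the output depends only on m.
--     # The sequence is a 220-line cycle (20 unique + 5x10 small + 3x50 large),
--     # cycle c using counter base 21*c; compute each line directly from its index.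
--     def line_at(m):
--         c, r = divmod(m, 220)
--         base = 21 * c
--         if r < 20:
--             return f"Unique {base + r}"
--         if r < 70:
--             return f"Small pattern {base + 20}:{(r - 20) % 10}"
--         return f"Large pattern {base + 20}:{(r - 70) % 50}"
--     return [line_at(m) for m in range(num_lines)]
-- ===== Notes on version B (the rewrite author's own statement) =====
-- stated objective: alternative
-- what changed: Replaces A's stateful while-loop that appends/extends blocks with interleaved length checks by a closed-form random-access formula: each output line is computed independently from its index m via divmod(m, 220), built as a single comprehension over range(num_lines) with no running counter, no overshoot and no truncation.
import Mathlib
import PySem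

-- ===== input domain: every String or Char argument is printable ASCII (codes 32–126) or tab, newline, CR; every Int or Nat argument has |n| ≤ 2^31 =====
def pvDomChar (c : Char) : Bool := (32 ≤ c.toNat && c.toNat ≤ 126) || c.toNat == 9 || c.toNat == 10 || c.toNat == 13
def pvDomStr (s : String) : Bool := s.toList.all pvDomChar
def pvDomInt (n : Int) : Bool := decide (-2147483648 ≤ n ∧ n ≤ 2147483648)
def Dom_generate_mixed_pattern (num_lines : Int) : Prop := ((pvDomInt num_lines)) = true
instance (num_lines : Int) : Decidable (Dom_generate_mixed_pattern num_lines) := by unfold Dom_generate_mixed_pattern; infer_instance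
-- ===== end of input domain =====

-- B replaces A's stateful while-loop (appends, extends, interleaved length checks, truncation)
-- by a closed-form random-access formula: line m is computed directly from divmod(m, 220).

-- ===== PORT A =====
def pvUniqS (i : Int) : String := "Unique " ++ PySem.Int.toStr i

def pvSmallPat (i : Int) : List String :=
  (PySem.List.pyRange 0 10 1).map (fun j => "Small pattern " ++ PySem.Int.toStr i ++ ":" ++ PySem.Int.toStr j)

def pvLargePat (i : Int) : List String :=
  (PySem.List.pyRange 0 50 1).map (fun j => "Large pattern " ++ PySem.Int.toStr i ++ ":" ++ PySem.Int.toStr j)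

-- A's  `for _ in range(c): lines.append(f"Unique {i}"); i += 1; if len(lines) >= n: break`
def pvAUniq (n : Int) : Nat → List String → Int → List String × Int
  | 0, lines, i => (lines, i)
  | c+1, lines, i =>
    let lines' := lines ++ [pvUniqS i]
    if ((lines'.length : Int) ≥ n) then (lines', i + 1) else pvAUniq n c lines' (i + 1)

-- A's  `for _ in range(r): lines.extend(pattern); if len(lines) >= n: break`
def pvAExt (n : Int) (pat : List String) : Nat → List String → List String
  | 0, lines => lines
  | r+1, lines =>
    let lines' := lines ++ pat
    if ((lines'.length : Int) ≥ n) then lines' else pvAExt n pat r lines'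

-- length facts cited by pvALoop's decreasing_by
lemma pvAUniq_len_lt (n : Int) : ∀ (c : Nat) (lines : List String) (i : Int),
    lines.length < (pvAUniq n (c+1) lines i).1.length := by
  intro c
  induction c with
  | zero =>
    intro lines i
    simp only [pvAUniq]
    split <;> simp
  | succ c ih =>
    intro lines i
    simp only [pvAUniq]
    split
    · simp
    · exact Nat.lt_trans (by simp) (ih (lines ++ [pvUniqS i]) (i + 1))

lemma pvAExt_len_le (n : Int) (pat : List String) : ∀ (r : Nat) (lines : List String),
    lines.length ≤ (pvAExt n pat r lines).length := by
  intro r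
  induction r with
  | zero => intro lines; simp [pvAExt]
  | succ r ih =>
    intro lines
    simp only [pvAExt]
    split
    · simp
    · exact Nat.le_trans (by simp) (ih (lines ++ pat))

-- A's  `while len(lines) < num_lines: …`
def pvALoop (n : Int) (lines : List String) (i : Int) : List String :=
  if h : (lines.length : Int) < n then
    pvALoop n
      (pvAExt n (pvLargePat (pvAUniq n 20 lines i).2) 3
        (pvAExt n (pvSmallPat (pvAUniq n 20 lines i).2) 5 (pvAUniq n 20 lines i).1))
      ((pvAUniq n 20 lines i).2 + 1)
  else lines
termination_by (n - lines.length).toNat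
decreasing_by
  have h1 : lines.length < (pvAUniq n 20 lines i).1.length := pvAUniq_len_lt n 19 lines i
  have h2 := pvAExt_len_le n (pvSmallPat (pvAUniq n 20 lines i).2) 5 (pvAUniq n 20 lines i).1
  have h3 := pvAExt_len_le n (pvLargePat (pvAUniq n 20 lines i).2) 3
      (pvAExt n (pvSmallPat (pvAUniq n 20 lines i).2) 5 (pvAUniq n 20 lines i).1)
  omega

def generate_mixed_pattern (num_lines : Int) : List String :=
  PySem.List.slice (pvALoop num_lines [] 0) none (some num_lines)

-- ===== PORT B =====
-- B's local line_at(m): c, r = divmod(m, 220); closed-form string from (c, r)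
def pvLineAt (m : Int) : String :=
  let c := PySem.Int.floordiv m 220
  let r := PySem.Int.mod m 220
  let base := 21 * c
  if r < 20 then "Unique " ++ PySem.Int.toStr (base + r)
  else if r < 70 then
    "Small pattern " ++ PySem.Int.toStr (base + 20) ++ ":" ++ PySem.Int.toStr (PySem.Int.mod (r - 20) 10)
  else
    "Large pattern " ++ PySem.Int.toStr (base + 20) ++ ":" ++ PySem.Int.toStr (PySem.Int.mod (r - 70) 50)

def generate_mixed_pattern_alt (num_lines : Int) : List String :=
  (PySem.List.pyRange 0 num_lines 1).map pvLineAt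

-- ===== PRECONDITION & SPEC =====
def Spec_generate_mixed_pattern (num_lines : Int) (out : List String) : Prop := out = generate_mixed_pattern_alt num_lines
instance (num_lines : Int) (out : List String) : Decidable (Spec_generate_mixed_pattern num_lines out) := by unfold Spec_generate_mixed_pattern; infer_instance

-- ===== CLAIM (what is proved, stated in full; the proofs are below) =====
def Claim_equal_generate_mixed_pattern : Prop := ∀ (num_lines : Int), Dom_generate_mixed_pattern num_lines → Spec_generate_mixed_pattern num_lines (generate_mixed_pattern num_lines)

-- ===== LEMMAS AND PROOFS =====

-- one 220-line cycle with base index 21*k, as A's loop body produces it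
def pvBCycle (k : Int) : List String :=
  ((PySem.List.pyRange 0 20 1).map (fun d => pvUniqS (21 * k + d)))
    ++ (List.replicate 5 (pvSmallPat (21 * k + 20))).flatten
    ++ (List.replicate 3 (pvLargePat (21 * k + 20))).flatten

-- the infinite cycle sequence, cut after m cycles
def pvF (m : Nat) : List String := (List.range m).flatMap (fun (k : Nat) => pvBCycle (k : Int))

lemma pvF_succ (m : Nat) : pvF (m+1) = pvF m ++ pvBCycle (m : Int) := by
  simp [pvF, List.range_succ]

lemma pvF_add (a b : Nat) :
    pvF (a + b) = pvF a ++ (List.range b).flatMap (fun (j : Nat) => pvBCycle ((a : Int) + (j : Int))) := by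
  induction b with
  | zero => simp
  | succ b ih =>
    rw [show a + (b + 1) = (a + b) + 1 from rfl, pvF_succ, ih, List.range_succ]
    simp [List.flatMap_append, List.append_assoc]

lemma pvBCycle_len (k : Int) : (pvBCycle k).length = 220 := by
  simp [pvBCycle, pvSmallPat, pvLargePat, PySem.List.length_pyRange_one]

lemma pvF_len (m : Nat) : (pvF m).length = 220 * m := by
  induction m with
  | zero => simp [pvF]
  | succ m ih => rw [pvF_succ]; simp [ih, pvBCycle_len]; ring

-- both results are truncated at num_lines; a shared prefix of length ≥ nn decides the take
lemma pvTake_pre (l1 l2 p : List String) (nn : Nat) (h : nn ≤ p.length)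
    (h1 : ∃ x, l1 = p ++ x) (h2 : ∃ y, l2 = p ++ y) : l1.take nn = l2.take nn := by
  obtain ⟨x, rfl⟩ := h1
  obtain ⟨y, rfl⟩ := h2
  rw [List.take_append_of_le_length h, List.take_append_of_le_length h]

-- characterization of A's unique-append loop
lemma pvAUniq_char (n : Int) : ∀ (c : Nat) (lines : List String) (i : Int),
    ∃ c' : Nat, c' ≤ c ∧ (0 < c → 0 < c') ∧
      pvAUniq n c lines i
        = (lines ++ (List.range c').map (fun (d : Nat) => pvUniqS (i + (d : Int))), i + (c' : Int)) ∧
      (c' = c ∨ n ≤ ((lines.length : Int) + (c' : Int))) := by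
  intro c
  induction c with
  | zero => intro lines i; exact ⟨0, by simp [pvAUniq]⟩
  | succ c ih =>
    intro lines i
    simp only [pvAUniq]
    split
    · rename_i hstop
      refine ⟨1, by omega, by omega, ?_, Or.inr (by simpa using hstop)⟩
      simp
    · rename_i hgo
      obtain ⟨c'', hle, _, heq, hcase⟩ := ih (lines ++ [pvUniqS i]) (i + 1)
      have hlist : lines ++ [pvUniqS i] ++ (List.range c'').map (fun (d : Nat) => pvUniqS (i + 1 + (d : Int)))
          = lines ++ (List.range (c'' + 1)).map (fun (d : Nat) => pvUniqS (i + (d : Int))) := by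
        rw [List.range_succ_eq_map, List.map_cons, List.map_map, List.append_assoc,
          List.singleton_append]
        congr 1
        congr 1
        · congr 1; simp
        · apply List.map_congr_left
          intro d _
          simp only [Function.comp_apply]
          congr 1
          push_cast
          ring
      refine ⟨c'' + 1, by omega, by omega, ?_, ?_⟩
      · rw [heq]
        simp only [Prod.mk.injEq]
        exact ⟨hlist, by push_cast; ring⟩
      · rcases hcase with h | h
        · left; omega
        · right; simp only [List.length_append, List.length_singleton] at h; push_cast at h ⊢; omega

-- characterization of A's extend loop
lemma pvAExt_char (n : Int) (pat : List String) : ∀ (r : Nat) (lines : List String),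
    ∃ r' : Nat, r' ≤ r ∧ (0 < r → 0 < r') ∧
      pvAExt n pat r lines = lines ++ (List.replicate r' pat).flatten ∧
      (r' = r ∨ n ≤ ((pvAExt n pat r lines).length : Int)) := by
  intro r
  induction r with
  | zero => intro lines; exact ⟨0, by simp [pvAExt]⟩
  | succ r ih =>
    intro lines
    simp only [pvAExt]
    split
    · rename_i hstop
      refine ⟨1, by omega, by omega, by simp, Or.inr (by simpa using hstop)⟩
    · rename_i hgo
      obtain ⟨r'', hle, _, heq, hcase⟩ := ih (lines ++ pat)
      refine ⟨r'' + 1, by omega, by omega, ?_, ?_⟩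
      · rw [heq, List.replicate_succ]; simp
      · rcases hcase with h | h
        · left; omega
        · right; exact h

lemma pvReplicate_flatten_split (r r' : Nat) (h : r' ≤ r) (pat : List String) :
    (List.replicate r pat).flatten
      = (List.replicate r' pat).flatten ++ (List.replicate (r - r') pat).flatten := by
  rw [← List.flatten_append, ← List.replicate_add, Nat.add_sub_cancel' h]

lemma pvRange_map_split (c c' : Nat) (h : c' ≤ c) (f : Nat → String) :
    (List.range c).map f
      = (List.range c').map f ++ ((List.range (c - c')).map (fun d => f (c' + d))) := by
  conv_lhs => rw [show c = c' + (c - c') from by omega]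
  rw [List.range_add, List.map_append, List.map_map]
  rfl

-- B's cycle block written the way A's characterizations produce it
lemma pvBCycle_eq (k : Int) :
    pvBCycle k = (List.range 20).map (fun (d : Nat) => pvUniqS (21 * k + (d : Int)))
      ++ (List.replicate 5 (pvSmallPat (21 * k + 20))).flatten
      ++ (List.replicate 3 (pvLargePat (21 * k + 20))).flatten := by
  rw [pvBCycle, PySem.List.pyRange_one]
  norm_num [List.map_map, Function.comp_def]
  rfl

-- the loop returns its argument once the length bound is met
lemma pvALoop_exit (n : Int) (lines : List String) (i : Int) (h : ¬ ((lines.length : Int) < n)) :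
    pvALoop n lines i = lines := by
  rw [pvALoop, dif_neg h]

-- main loop invariant: entered at a full-cycle boundary, the loop's result agrees
-- with the cycle sequence on the first num_lines items
lemma pvALoop_take (n : Int) : ∀ (m k : Nat),
    ((220 * k : Nat) : Int) < n → n ≤ ((220 * (k + m) : Nat) : Int) →
    (pvALoop n (pvF k) (21 * (k : Int))).take n.toNat = (pvF (k + m)).take n.toNat := by
  intro m
  induction m with
  | zero => intro k h1 h2; omega
  | succ m ih =>
    intro k h1 h2
    rw [pvALoop, dif_pos (by rw [pvF_len]; exact_mod_cast h1)]
    obtain ⟨c', hc'le, hc'pos, hu, hucase⟩ := pvAUniq_char n 20 (pvF k) (21 * (k : Int))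
    rw [hu]
    dsimp only
    set i1 : Int := 21 * (k : Int) + (c' : Int) with hi1
    set l1 : List String := pvF k ++ (List.range c').map (fun (d : Nat) => pvUniqS (21 * (k : Int) + (d : Int))) with hl1
    obtain ⟨r', hr'le, hr'pos, hs, hscase⟩ := pvAExt_char n (pvSmallPat i1) 5 l1
    obtain ⟨r'', hr''le, hr''pos, hl, hlcase⟩ :=
      pvAExt_char n (pvLargePat i1) 3 (pvAExt n (pvSmallPat i1) 5 l1)
    have hl1len : l1.length = 220 * k + c' := by simp [hl1, pvF_len]
    have hFdec : pvF (k + (m + 1))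
        = pvF (k + 1) ++ (List.range m).flatMap (fun (j : Nat) => pvBCycle (((k : Nat) + 1 : Nat) + (j : Int))) := by
      rw [show k + (m + 1) = (k + 1) + m from by omega, pvF_add]
    by_cases hc20 : c' = 20
    · -- unique loop ran fully: i1 is the true base 21*k + 20
      subst hc20
      have hi1v : i1 = 21 * (k : Int) + 20 := by simp [hi1]
      by_cases hr5 : r' = 5
      · subst hr5
        by_cases hr3 : r'' = 3
        · subst hr3
          have hfull : pvAExt n (pvLargePat i1) 3 (pvAExt n (pvSmallPat i1) 5 l1) = pvF (k + 1) := by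
            rw [hl, hs, pvF_succ, pvBCycle_eq, hi1v, hl1]
            simp [List.append_assoc]
          rw [hfull]
          by_cases hguard : ((pvF (k + 1)).length : Int) < n
          · -- recurse on the next cycle
            have h21 : i1 + 1 = 21 * (((k + 1 : Nat) : Nat) : Int) := by rw [hi1v]; push_cast; ring
            rw [h21]
            have := ih (k + 1) (by rw [pvF_len] at hguard; exact_mod_cast hguard)
              (by push_cast at h2 ⊢; omega)
            rw [this, show (k + 1) + m = k + (m + 1) from by omega]
          · -- loop exits with exactly the full cycles
            rw [pvALoop_exit n _ _ hguard]
            refine pvTake_pre _ _ (pvF (k + 1)) _ ?_ ⟨[], by simp⟩ ⟨_, hFdec⟩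
            rw [pvF_len] at hguard ⊢
            omega
        · -- large loop broke early (length already ≥ n): rest is truncated away
          rcases hlcase with h | h
          · omega
          rw [pvALoop_exit n _ _ (by rw [hl] at h ⊢; simp at h ⊢; omega)]
          refine pvTake_pre _ _ (pvAExt n (pvLargePat i1) 3 (pvAExt n (pvSmallPat i1) 5 l1)) _
            (by omega) ⟨[], by simp⟩ ?_
          refine ⟨(List.replicate (3 - r'') (pvLargePat i1)).flatten
            ++ (List.range m).flatMap (fun (j : Nat) => pvBCycle (((k : Nat) + 1 : Nat) + (j : Int))), ?_⟩
          rw [hFdec, pvF_succ, pvBCycle_eq, hl, hs, hi1v, hl1,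
            pvReplicate_flatten_split 3 r'' hr''le (pvLargePat (21 * (k : Int) + 20))]
          simp [List.append_assoc]
      · -- small loop broke early (length already ≥ n): rest is truncated away
        rcases hscase with h | h
        · omega
        have hge := pvAExt_len_le n (pvLargePat i1) 3 (pvAExt n (pvSmallPat i1) 5 l1)
        rw [pvALoop_exit n _ _ (by omega)]
        refine pvTake_pre _ _ (pvAExt n (pvSmallPat i1) 5 l1) _ (by omega) ⟨_, hl⟩ ?_
        refine ⟨(List.replicate (5 - r') (pvSmallPat i1)).flatten
          ++ ((List.replicate 3 (pvLargePat i1)).flatten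
          ++ (List.range m).flatMap (fun (j : Nat) => pvBCycle (((k : Nat) + 1 : Nat) + (j : Int)))), ?_⟩
        rw [hFdec, pvF_succ, pvBCycle_eq, hs, hi1v, hl1,
          pvReplicate_flatten_split 5 r' hr'le (pvSmallPat (21 * (k : Int) + 20))]
        simp [List.append_assoc]
    · -- unique loop broke early (length already ≥ n): rest is truncated away
      rcases hucase with h | h
      · omega
      have hl1n : n ≤ (l1.length : Int) := by
        rw [pvF_len] at h
        rw [hl1len]
        push_cast at h ⊢
        omega
      have hge1 := pvAExt_len_le n (pvSmallPat i1) 5 l1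
      have hge2 := pvAExt_len_le n (pvLargePat i1) 3 (pvAExt n (pvSmallPat i1) 5 l1)
      rw [hs] at hge2
      rw [pvALoop_exit n _ _ (by rw [hl]; simp only [List.length_append]; push_cast; omega)]
      refine pvTake_pre _ _ l1 _ (by omega) ⟨_, by rw [hl, hs, List.append_assoc]⟩ ?_
      refine ⟨((List.range (20 - c')).map (fun d => pvUniqS (21 * (k : Int) + ((c' + d : Nat) : Int))))
        ++ ((List.replicate 5 (pvSmallPat (21 * (k : Int) + 20))).flatten
        ++ ((List.replicate 3 (pvLargePat (21 * (k : Int) + 20))).flatten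
        ++ (List.range m).flatMap (fun (j : Nat) => pvBCycle (((k : Nat) + 1 : Nat) + (j : Int))))), ?_⟩
      rw [hFdec, pvF_succ, pvBCycle_eq, hl1,
        pvRange_map_split 20 c' (by omega) (fun (d : Nat) => pvUniqS (21 * (k : Int) + (d : Int)))]
      simp [List.append_assoc]

-- ===== B-side bridge: pvLineAt indexes the cycle sequence =====

lemma pvLineAt_at (m r : Nat) (hr : r < 220) :
    pvLineAt ((220 * m + r : Nat) : Int)
      = (if r < 20 then pvUniqS (21 * (m : Int) + (r : Nat))
         else if r < 70 then
           "Small pattern " ++ PySem.Int.toStr (21 * (m : Int) + 20) ++ ":" ++ PySem.Int.toStr (((r - 20) % 10 : Nat) : Int)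
         else
           "Large pattern " ++ PySem.Int.toStr (21 * (m : Int) + 20) ++ ":" ++ PySem.Int.toStr (((r - 70) % 50 : Nat) : Int)) := by
  have hdiv : PySem.Int.floordiv ((220 * m + r : Nat) : Int) 220 = (m : Int) := by
    rw [show ((220:Int)) = ((220:Nat):Int) from rfl, PySem.Int.floordiv_natCast]
    exact_mod_cast congrArg (Nat.cast (R := Int)) (show (220 * m + r) / 220 = m by omega)
  have hmod : PySem.Int.mod ((220 * m + r : Nat) : Int) 220 = (r : Int) := by
    rw [show ((220:Int)) = ((220:Nat):Int) from rfl, PySem.Int.mod_natCast]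
    exact_mod_cast congrArg (Nat.cast (R := Int)) (show (220 * m + r) % 220 = r by omega)
  simp only [pvLineAt, hdiv, hmod]
  by_cases h1 : r < 20
  · rw [if_pos (by exact_mod_cast h1), if_pos h1]
    rfl
  · rw [if_neg (by exact_mod_cast h1), if_neg h1]
    by_cases h2 : r < 70
    · rw [if_pos (by exact_mod_cast h2), if_pos h2]
      rw [show ((r:Int) - 20) = ((r - 20 : Nat) : Int) from by omega,
        show ((10:Int)) = ((10:Nat):Int) from rfl, PySem.Int.mod_natCast]
    · rw [if_neg (by exact_mod_cast h2), if_neg h2]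
      rw [show ((r:Int) - 70) = ((r - 70 : Nat) : Int) from by omega,
        show ((50:Int)) = ((50:Nat):Int) from rfl, PySem.Int.mod_natCast]

lemma pvSmall_seg (i : Int) :
    (List.range 50).map (fun r => "Small pattern " ++ PySem.Int.toStr i ++ ":" ++ PySem.Int.toStr ((r % 10 : Nat) : Int))
      = (List.replicate 5 (pvSmallPat i)).flatten := by
  rfl

lemma pvLarge_seg (i : Int) :
    (List.range 150).map (fun r => "Large pattern " ++ PySem.Int.toStr i ++ ":" ++ PySem.Int.toStr ((r % 50 : Nat) : Int))
      = (List.replicate 3 (pvLargePat i)).flatten := by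
  rfl

set_option maxRecDepth 10000 in
lemma pvBCycle_map (m : Nat) :
    (List.range 220).map (fun r => pvLineAt ((220 * m + r : Nat) : Int)) = pvBCycle (m : Int) := by
  have hsplit : List.range 220
      = List.range 20 ++ ((List.range 50).map (fun r => 20 + r) ++ (List.range 150).map (fun r => 70 + r)) := by
    rfl
  have h1 : List.map (fun r => pvLineAt ((220 * m + r : Nat) : Int)) (List.range 20)
      = List.map (fun (d : Nat) => pvUniqS (21 * (m : Int) + (d : Int))) (List.range 20) := by
    apply List.map_congr_left
    intro r hr
    have hr20 : r < 20 := List.mem_range.mp hr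
    rw [pvLineAt_at m r (by omega), if_pos hr20]
  have h2 : List.map (fun r => pvLineAt ((220 * m + r : Nat) : Int)) (List.map (fun r => 20 + r) (List.range 50))
      = (List.replicate 5 (pvSmallPat (21 * (m : Int) + 20))).flatten := by
    rw [List.map_map, ← pvSmall_seg (21 * (m : Int) + 20)]
    apply List.map_congr_left
    intro r hr
    have hr50 : r < 50 := List.mem_range.mp hr
    simp only [Function.comp_apply]
    rw [pvLineAt_at m (20 + r) (by omega), if_neg (by omega), if_pos (by omega),
      show 20 + r - 20 = r from by omega]
  have h3 : List.map (fun r => pvLineAt ((220 * m + r : Nat) : Int)) (List.map (fun r => 70 + r) (List.range 150))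
      = (List.replicate 3 (pvLargePat (21 * (m : Int) + 20))).flatten := by
    rw [List.map_map, ← pvLarge_seg (21 * (m : Int) + 20)]
    apply List.map_congr_left
    intro r hr
    have hr150 : r < 150 := List.mem_range.mp hr
    simp only [Function.comp_apply]
    rw [pvLineAt_at m (70 + r) (by omega), if_neg (by omega), if_neg (by omega),
      show 70 + r - 70 = r from by omega]
  rw [hsplit, List.map_append, List.map_append, h1, h2, h3, pvBCycle_eq]
  simp [List.append_assoc]

lemma pvF_map (m : Nat) :
    pvF m = (List.range (220 * m)).map (fun (t : Nat) => pvLineAt (t : Int)) := by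
  induction m with
  | zero => simp [pvF]
  | succ m ih =>
    rw [pvF_succ, ih, show 220 * (m + 1) = 220 * m + 220 from by ring, List.range_add,
      List.map_append, List.map_map, ← pvBCycle_map m]
    rfl

-- ===== VERDICT (by name: the statement is the Claim_ definition above) =====
theorem generate_mixed_pattern_spec : Claim_equal_generate_mixed_pattern := by
  intro n _
  unfold Spec_generate_mixed_pattern generate_mixed_pattern generate_mixed_pattern_alt
  rw [PySem.List.pyRange_one]
  by_cases hn : n ≤ 0
  · rw [pvALoop_exit n [] 0 (by simp; omega)]
    simp [PySem.List.slice]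
    omega
  · have hn' : 0 < n := by omega
    -- q = number of full cycles needed
    set q : Nat := ((n - 1) / 220).toNat + 1 with hq
    have hlow : ((220 * (q - 1) : Nat) : Int) < n := by
      have := Int.ediv_mul_le (n - 1) (show (220:Int) ≠ 0 from by norm_num)
      have h1 : (0:Int) ≤ (n - 1) / 220 := Int.ediv_nonneg (by omega) (by norm_num)
      have h2 : ((((n - 1) / 220).toNat : Int)) = (n - 1) / 220 := Int.toNat_of_nonneg h1
      have h3 : 220 * ((n-1)/220) ≤ n - 1 := by
        have := Int.mul_ediv_add_emod (n - 1) 220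
        have := Int.emod_nonneg (n - 1) (show (220:Int) ≠ 0 from by norm_num)
        omega
      push_cast [hq]
      omega
    have hhigh : n ≤ ((220 * q : Nat) : Int) := by
      have h1 : (0:Int) ≤ (n - 1) / 220 := Int.ediv_nonneg (by omega) (by norm_num)
      have h2 : ((((n - 1) / 220).toNat : Int)) = (n - 1) / 220 := Int.toNat_of_nonneg h1
      have h3 : n - 1 < 220 * ((n-1)/220 + 1) := by
        have := Int.mul_ediv_add_emod (n - 1) 220
        have := Int.emod_lt_of_pos (n - 1) (show (0:Int) < 220 from by norm_num)
        omega
      push_cast [hq]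
      omega
    have hA : (pvALoop n [] 0).take n.toNat = (pvF q).take n.toNat := by
      have h0 : pvF 0 = [] := by simp [pvF]
      have := pvALoop_take n q 0 (by simpa using hn') (by simpa using hhigh)
      rw [h0] at this
      simpa using this
    rw [PySem.List.slice_to (pvALoop n [] 0) (by omega : (0:Int) ≤ n), hA, pvF_map,
      ← List.map_take, List.take_range]
    have hmin : min n.toNat (220 * q) = n.toNat := by omega
    have h00 : (n - 0).toNat = n.toNat := by omega
    rw [hmin, h00, List.map_map]
    apply List.map_congr_left
    intro t _
    simp
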